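-- pv_equiv track=rewrite | github.com/ABNascimento1964/LotteryGeniusApp | app.py | analisar_jogo
-- ===== SOURCE A (Python) =====
-- PRIMOS = {2, 3, 5, 7, 11, 13, 17, 19, 23}
--
-- FIBONACCI = {1, 2, 3, 5, 8, 13, 21}
--
-- BORDAS = {
--     1, 2, 3, 4, 5,
--     6, 10,
--     11, 15,
--     16, 20,
--     21, 22, 23, 24, 25
-- }
--
-- def analisar_jogo(jogo):
--     pares = sum(1 for n in jogo if n % 2 == 0)
--     impares = len(jogo) - pares
--     primos = sum(1 for n in jogo if n in PRIMOS)
--     fib = sum(1 for n in jogo if n in FIBONACCI)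
--     borda = sum(1 for n in jogo if n in BORDAS)
--     baixos = sum(1 for n in jogo if n <= 13)
--     altos = len(jogo) - baixos
--
--     return {
--         "pares": pares,
--         "impares": impares,
--         "primos": primos,
--         "fibonacci": fib,
--         "borda": borda,
--         "baixos": baixos,
--         "altos": altos,
--     }
-- ===== SOURCE B (Python) =====
-- PRIMOS = {2, 3, 5, 7, 11, 13, 17, 19, 23}
--
-- FIBONACCI = {1, 2, 3, 5, 8, 13, 21}
--
-- BORDAS = {
--     1, 2, 3, 4, 5,
--     6, 10,
--     11, 15,
--     16, 20,
--     21, 22, 23, 24, 25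
-- }
--
-- def analisar_jogo(jogo):
--     total = pares = primos = fib = borda = baixos = 0
--     for n in jogo:
--         total += 1
--         if n % 2 == 0:
--             pares += 1
--         if n in PRIMOS:
--             primos += 1
--         if n in FIBONACCI:
--             fib += 1
--         if n in BORDAS:
--             borda += 1
--         if n <= 13:
--             baixos += 1
--     return {
--         "pares": pares,
--         "impares": total - pares,
--         "primos": primos,
--         "fibonacci": fib,
--         "borda": borda,
--         "baixos": baixos,
--         "altos": total - baixos,
--     }
-- ===== Notes on version B (the rewrite author's own statement) =====
-- stated objective: alternative
-- what changed: Seven separate generator-expression scans (plus len) are replaced by one loop over jogo that maintains all five counters and the total at once; impares and altos are derived afterwards.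
import Mathlib
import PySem

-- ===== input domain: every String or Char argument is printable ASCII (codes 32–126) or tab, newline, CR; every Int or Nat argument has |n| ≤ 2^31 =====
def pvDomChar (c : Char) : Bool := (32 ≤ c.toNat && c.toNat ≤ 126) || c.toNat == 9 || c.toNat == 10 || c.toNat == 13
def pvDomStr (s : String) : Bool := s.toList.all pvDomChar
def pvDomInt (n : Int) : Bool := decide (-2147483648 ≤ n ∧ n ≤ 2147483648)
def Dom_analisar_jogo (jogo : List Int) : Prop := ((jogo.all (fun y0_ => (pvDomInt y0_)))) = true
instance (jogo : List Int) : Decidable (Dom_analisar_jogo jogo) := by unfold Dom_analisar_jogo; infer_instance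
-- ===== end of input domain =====

-- B replaces A's seven separate scans of jogo by a single loop maintaining all counters at once (objective: alternative decomposition, same O(n) cost).

-- ===== PORT A =====
-- module constants (Python sets of ints)
def PRIMOS : PySem.Set Int := PySem.Set.ofList [2, 3, 5, 7, 11, 13, 17, 19, 23]
def FIBONACCI : PySem.Set Int := PySem.Set.ofList [1, 2, 3, 5, 8, 13, 21]
def BORDAS : PySem.Set Int := PySem.Set.ofList [1, 2, 3, 4, 5, 6, 10, 11, 15, 16, 20, 21, 22, 23, 24, 25]

-- sum(1 for n in jogo if p n)
def pyCount (jogo : List Int) (p : Int → Bool) : Int :=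
  jogo.foldl (fun acc n => if p n then acc + 1 else acc) 0

def analisar_jogo (jogo : List Int) : List (String × Int) :=
  let pares := pyCount jogo (fun n => PySem.Int.mod n 2 == 0)
  let impares := (jogo.length : Int) - pares
  let primos := pyCount jogo (fun n => PRIMOS.contains n)
  let fib := pyCount jogo (fun n => FIBONACCI.contains n)
  let borda := pyCount jogo (fun n => BORDAS.contains n)
  let baixos := pyCount jogo (fun n => n ≤ 13)
  let altos := (jogo.length : Int) - baixos
  [("pares", pares), ("impares", impares), ("primos", primos),
   ("fibonacci", fib), ("borda", borda), ("baixos", baixos), ("altos", altos)]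

-- ===== PORT B =====
-- single pass: state = (total, pares, primos, fib, borda, baixos)
def stepB (st : Int × Int × Int × Int × Int × Int) (n : Int) : Int × Int × Int × Int × Int × Int :=
  let (total, pares, primos, fib, borda, baixos) := st
  (total + 1,
   (if PySem.Int.mod n 2 == 0 then pares + 1 else pares),
   (if PRIMOS.contains n then primos + 1 else primos),
   (if FIBONACCI.contains n then fib + 1 else fib),
   (if BORDAS.contains n then borda + 1 else borda),
   (if n ≤ 13 then baixos + 1 else baixos))

def analisar_jogo_alt (jogo : List Int) : List (String × Int) :=
  let (total, pares, primos, fib, borda, baixos) := jogo.foldl stepB (0, 0, 0, 0, 0, 0)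
  [("pares", pares), ("impares", total - pares), ("primos", primos),
   ("fibonacci", fib), ("borda", borda), ("baixos", baixos), ("altos", total - baixos)]

-- ===== PRECONDITION & SPEC =====
def Spec_analisar_jogo (jogo : List Int) (out : List (String × Int)) : Prop := out = analisar_jogo_alt jogo
instance (jogo : List Int) (out : List (String × Int)) : Decidable (Spec_analisar_jogo jogo out) := by unfold Spec_analisar_jogo; infer_instance

-- ===== CLAIM (what is proved, stated in full; the proofs are below) =====
def Claim_equal_analisar_jogo : Prop := ∀ (jogo : List Int), Dom_analisar_jogo jogo → Spec_analisar_jogo jogo (analisar_jogo jogo)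

-- ===== LEMMAS AND PROOFS =====

theorem foldl_count_shift (q : Int → Bool) (ys : List Int) (c : Int) :
    ys.foldl (fun acc n => if q n then acc + 1 else acc) c = c + pyCount ys q := by
  induction ys generalizing c with
  | nil => simp [pyCount]
  | cons y ys ihy =>
      simp only [pyCount, List.foldl_cons]
      by_cases hy : q y
      · simp only [hy, if_pos]
        rw [ihy, ihy]
        ring
      · simp only [hy, Bool.false_eq_true, if_false]
        rw [ihy, ihy]
        ring

theorem pyCount_cons (q : Int → Bool) (x : Int) (xs : List Int) :
    pyCount (x :: xs) q = (if q x then 1 else 0) + pyCount xs q := by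
  simp only [pyCount, List.foldl_cons]
  by_cases hx : q x
  · simp only [hx, if_pos]
    rw [foldl_count_shift, foldl_count_shift]
    ring
  · simp [hx]

theorem foldl_stepB (jogo : List Int) (t p pr f b bx : Int) :
    jogo.foldl stepB (t, p, pr, f, b, bx) =
      (t + (jogo.length : Int),
       p + pyCount jogo (fun n => PySem.Int.mod n 2 == 0),
       pr + pyCount jogo (fun n => PRIMOS.contains n),
       f + pyCount jogo (fun n => FIBONACCI.contains n),
       b + pyCount jogo (fun n => BORDAS.contains n),
       bx + pyCount jogo (fun n => n ≤ 13)) := by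
  induction jogo generalizing t p pr f b bx with
  | nil => simp [pyCount]
  | cons x xs ih =>
      simp only [List.foldl_cons, stepB, ih, pyCount_cons, List.length_cons, Prod.mk.injEq, decide_eq_true_eq]
      push_cast
      refine ⟨by ring, ?_, ?_, ?_, ?_, ?_⟩ <;> split_ifs <;> ring

-- ===== VERDICT (by name: the statement is the Claim_ definition above) =====
theorem analisar_jogo_spec : Claim_equal_analisar_jogo := by
  intro jogo _
  unfold Spec_analisar_jogo analisar_jogo analisar_jogo_alt
  rw [foldl_stepB]
  simp
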